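-- pv_equiv track=rewrite | github.com/caniko/assignments | UiO/IN2010_2022/assignment_1/src/3b.py | climb_down_the_tree
-- ===== SOURCE A (Python) =====
-- from typing import Sequence
--
-- def climb_down_the_tree(current_value: int, branches: list[dict[int, set[int]]]) -> Sequence:
--     path = [str(current_value)]
--     while True:
--         for parent_node, children in branches.items():
--             if current_value in children:
--                 path.append(str(parent_node))
--                 current_value = parent_node
--                 break
--         else:   # no break
--             break
--     return ", ".join(path)
-- ===== SOURCE B (Python) =====
-- def climb_down_the_tree(current_value, branches):
--     # Build a child -> parent map once (iterating in reverse so the FIRST branch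
--     # containing a child wins, matching the original's first-match scan), then
--     # just follow parent pointers, stringifying the whole path at the end.
--     parent = {c: p for p, cs in reversed(list(branches.items())) for c in cs}
--     nodes = [current_value]
--     while nodes[-1] in parent:
--         nodes.append(parent[nodes[-1]])
--     return ", ".join(map(str, nodes))
-- ===== Notes on version B (the rewrite author's own statement) =====
-- stated objective: alternative
-- what changed: Instead of rescanning every branch on each step of the upward walk, B builds a child-to-parent dict in one reverse pass (so first occurrence wins) and then simply chases parent pointers over an Int path, converting to strings once at the end.
import Mathlib
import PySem

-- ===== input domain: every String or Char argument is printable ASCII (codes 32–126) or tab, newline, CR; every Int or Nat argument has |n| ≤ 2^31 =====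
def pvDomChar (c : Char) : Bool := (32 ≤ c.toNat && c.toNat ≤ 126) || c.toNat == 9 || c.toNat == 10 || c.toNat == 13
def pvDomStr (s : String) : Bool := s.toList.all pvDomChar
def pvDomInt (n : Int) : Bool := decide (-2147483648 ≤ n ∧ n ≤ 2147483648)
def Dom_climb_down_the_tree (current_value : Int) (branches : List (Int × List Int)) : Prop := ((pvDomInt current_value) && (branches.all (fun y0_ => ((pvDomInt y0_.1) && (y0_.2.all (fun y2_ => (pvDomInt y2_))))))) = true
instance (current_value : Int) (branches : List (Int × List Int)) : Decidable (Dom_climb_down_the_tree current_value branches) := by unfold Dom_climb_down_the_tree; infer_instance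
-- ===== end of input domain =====

-- B builds a child->parent dict once (reverse pass, first branch wins) and chases pointers over an Int path, stringifying at the end; return-value equivalence (both ports totalise the possibly-infinite walk with the same fuel).

-- ===== PORT A =====
-- first key whose children contain v (the for/else scan of A's loop body)
def pvParentOf (branches : List (Int × List Int)) (v : Int) : Option Int :=
  (branches.find? (fun pc => pc.2.contains v)).map Prod.fst

-- A's 'while True' loop, totalised with fuel; branches.length + 1 iterations suffice whenever Python's loop terminates
def climbLoopA (branches : List (Int × List Int)) : Nat → Int → List String → List String
  | 0, _, path => path
  | Nat.succ f, v, path =>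
    match pvParentOf branches v with
    | some p => climbLoopA branches f p (path ++ [PySem.Int.toStr p])
    | none => path

def climb_down_the_tree (current_value : Int) (branches : List (Int × List Int)) : String :=
  PySem.Str.join ", " (climbLoopA branches (branches.length + 1) current_value [PySem.Int.toStr current_value])

-- ===== PORT B =====
-- the dict comprehension over reversed(branches.items()): overwrite, so the first branch in original order wins
def pvParentMap (branches : List (Int × List Int)) : PySem.Dict Int Int :=
  branches.reverse.foldl (fun d pc => pc.2.foldl (fun d c => d.insert c pc.1) d) PySem.Dict.empty

-- B's 'while nodes[-1] in parent' pointer chase, same fuel, yielding the Int path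
def pvChase (parent : PySem.Dict Int Int) : Nat → Int → List Int
  | 0, v => [v]
  | Nat.succ f, v =>
    match parent.get? v with
    | some p => v :: pvChase parent f p
    | none => [v]

def climb_down_the_tree_alt (current_value : Int) (branches : List (Int × List Int)) : String :=
  PySem.Str.join ", " ((pvChase (pvParentMap branches) (branches.length + 1) current_value).map PySem.Int.toStr)

-- ===== PRECONDITION & SPEC =====
-- (no Pre_: the two ports are equal on every input)
def Spec_climb_down_the_tree (current_value : Int) (branches : List (Int × List Int)) (out : String) : Prop := out = climb_down_the_tree_alt current_value branches
instance (current_value : Int) (branches : List (Int × List Int)) (out : String) : Decidable (Spec_climb_down_the_tree current_value branches out) := by unfold Spec_climb_down_the_tree; infer_instance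

-- ===== CLAIM (what is proved, stated in full; the proofs are below) =====
def Claim_equal_climb_down_the_tree : Prop := ∀ (current_value : Int) (branches : List (Int × List Int)), Dom_climb_down_the_tree current_value branches → Spec_climb_down_the_tree current_value branches (climb_down_the_tree current_value branches)

-- ===== LEMMAS AND PROOFS =====

-- overwrite fold over one children list: v ∈ cs shadows the old binding
theorem get?_foldl_insert (cs : List Int) (p : Int) (d : PySem.Dict Int Int) (v : Int) :
    (cs.foldl (fun d c => d.insert c p) d).get? v
      = if v ∈ cs then some p else d.get? v := by
  induction cs generalizing d with
  | nil => simp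
  | cons c cs ih =>
    by_cases hv : v = c
    · subst hv
      by_cases hm : v ∈ cs
      · simp [ih, hm]
      · simp [ih, hm, PySem.Dict.get?_insert_self]
    · simp only [List.foldl_cons, ih, PySem.Dict.get?_insert_of_ne _ _ hv,
        List.mem_cons, hv, false_or]

-- the reverse-order build: lookup in the dict is exactly A's first-match scan
theorem get?_parentMap_aux (branches : List (Int × List Int)) (d : PySem.Dict Int Int) (v : Int) :
    (branches.reverse.foldl (fun d pc => pc.2.foldl (fun d c => d.insert c pc.1) d) d).get? v
      = match pvParentOf branches v with
        | some p => some p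
        | none => d.get? v := by
  induction branches generalizing d with
  | nil => simp [pvParentOf]
  | cons pc rest ih =>
    rw [List.reverse_cons, List.foldl_append, List.foldl_cons, List.foldl_nil,
        get?_foldl_insert, ih]
    by_cases hm : v ∈ pc.2
    · cases h : pvParentOf rest v <;>
        simp [pvParentOf, hm]
    · simp only [pvParentOf, List.find?_cons, hm, decide_false, List.contains_eq_mem]
      rfl

theorem get?_parentMap (branches : List (Int × List Int)) (v : Int) :
    (pvParentMap branches).get? v = pvParentOf branches v := by
  rw [pvParentMap, get?_parentMap_aux]
  cases pvParentOf branches v <;> simp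

-- A's string-accumulating loop is the stringified Int chase appended to the seed path
theorem climbLoopA_eq_chase (branches : List (Int × List Int)) (fuel : Nat) (v : Int) (path : List String) :
    climbLoopA branches fuel v (path ++ [PySem.Int.toStr v])
      = path ++ (pvChase (pvParentMap branches) fuel v).map PySem.Int.toStr := by
  induction fuel generalizing v path with
  | zero => simp [climbLoopA, pvChase]
  | succ f ih =>
    simp only [climbLoopA, pvChase, get?_parentMap]
    cases h : pvParentOf branches v with
    | none => simp
    | some p =>
      have := ih p (path ++ [PySem.Int.toStr v])
      simpa [List.append_assoc] using this

-- ===== VERDICT (by name: the statement is the Claim_ definition above) =====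
theorem climb_down_the_tree_spec : Claim_equal_climb_down_the_tree := by
  intro v branches _
  unfold Spec_climb_down_the_tree climb_down_the_tree climb_down_the_tree_alt
  have h := climbLoopA_eq_chase branches (branches.length + 1) v []
  simp only [List.nil_append] at h
  rw [h]
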